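-- pv_equiv track=rewrite | github.com/kcx2366425574/LeetCode | leetcode/num_dot_num/16.11_diving_board.py | divingBoard1
-- ===== SOURCE A (Python) =====
-- def divingBoard1(shorter: int, longer: int, k: int) -> list[int]:
--     if k == 0:
--         return []
--     ret = [0]
--     while k > 0:
--         short = list(map(lambda x: x + shorter, ret))
--         long = list(map(lambda x: x + longer, ret))
--         ret = short + long
--         k -= 1
--     return ret
-- ===== SOURCE B (Python) =====
-- def divingBoard1(shorter: int, longer: int, k: int) -> list[int]:
--     if k == 0:
--         return []
--     res = []
--     for j in range(2 ** k):
--         ones = bin(j).count("1")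
--         res.append((k - ones) * shorter + ones * longer)
--     return res
-- ===== Notes on version B (the rewrite author's own statement) =====
-- stated objective: alternative
-- what changed: B computes each of the 2^k results directly from its index's popcount ((k-ones)*shorter + ones*longer) in one pass over range(2**k), instead of A's k rounds of doubling a prefix list via two maps and a concatenation.
-- outside the precondition, e.g. on divingBoard1(1, 2, -1): A returns [0], B raises TypeError
import Mathlib
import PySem

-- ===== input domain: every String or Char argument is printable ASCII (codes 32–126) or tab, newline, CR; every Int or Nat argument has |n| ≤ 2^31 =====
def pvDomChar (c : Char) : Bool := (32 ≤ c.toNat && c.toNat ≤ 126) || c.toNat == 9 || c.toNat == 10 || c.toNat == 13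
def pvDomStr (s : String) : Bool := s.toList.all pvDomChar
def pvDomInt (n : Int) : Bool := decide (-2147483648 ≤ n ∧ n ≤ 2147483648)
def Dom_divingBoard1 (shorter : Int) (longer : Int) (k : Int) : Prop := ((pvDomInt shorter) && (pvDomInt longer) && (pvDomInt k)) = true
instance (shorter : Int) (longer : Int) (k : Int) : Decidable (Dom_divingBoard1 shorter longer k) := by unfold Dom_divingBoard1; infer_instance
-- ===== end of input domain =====

-- B replaces A's k rounds of list doubling by one pass computing each element from its index's popcount (objective: alternative decomposition).

-- ===== PORT A =====
-- while k > 0: ret = map(+shorter) ret ++ map(+longer) ret; k -= 1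
def divingBoard1Loop (shorter : Int) (longer : Int) (k : Int) (ret : List Int) : List Int :=
  if _h : 0 < k then
    divingBoard1Loop shorter longer (k - 1) (ret.map (· + shorter) ++ ret.map (· + longer))
  else ret
termination_by k.toNat
decreasing_by omega

def divingBoard1 (shorter : Int) (longer : Int) (k : Int) : List Int :=
  if k == 0 then [] else divingBoard1Loop shorter longer k [0]

-- ===== PORT B =====
-- bin(j).count('1') for j ≥ 0: exact, since bin's '0b…' digits of a nonnegative int hold as many '1's as the popcount
def pyBinOnes (n : Nat) : Nat :=
  if n = 0 then 0 else pyBinOnes (n / 2) + n % 2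

def divingBoard1_alt (shorter : Int) (longer : Int) (k : Int) : List Int :=
  if k == 0 then []
  else (List.range (2 ^ k.toNat)).map (fun j =>
    (k - (pyBinOnes j : Int)) * shorter + (pyBinOnes j : Int) * longer)

-- ===== PRECONDITION & SPEC =====
-- Pre_ excludes k < 0, where A's return of [0] is an accident of the never-entered loop's initial state; B raises TypeError there (range(2**k) with fractional 2**k).
def Pre_divingBoard1 (shorter : Int) (longer : Int) (k : Int) : Prop := 0 ≤ k
instance (shorter : Int) (longer : Int) (k : Int) : Decidable (Pre_divingBoard1 shorter longer k) := by unfold Pre_divingBoard1; infer_instance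
def pvWitness_divingBoard1 : Int × Int × Int := (1, 2, 2)

def Spec_divingBoard1 (shorter : Int) (longer : Int) (k : Int) (out : List Int) : Prop := out = divingBoard1_alt shorter longer k
instance (shorter : Int) (longer : Int) (k : Int) (out : List Int) : Decidable (Spec_divingBoard1 shorter longer k out) := by unfold Spec_divingBoard1; infer_instance

-- ===== CLAIM (what is proved, stated in full; the proofs are below) =====
def Claim_equal_divingBoard1 : Prop := ∀ (shorter : Int) (longer : Int) (k : Int), Dom_divingBoard1 shorter longer k → Pre_divingBoard1 shorter longer k → Spec_divingBoard1 shorter longer k (divingBoard1 shorter longer k)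

-- ===== LEMMAS AND PROOFS =====

lemma pvFlatMapSingleton {α β : Type} (f : α → β) : ∀ (l : List α),
    l.flatMap (fun x => [f x]) = l.map f := by
  intro l
  induction l with
  | nil => rfl
  | cons a t ih => simp [List.flatMap_cons, ih]

-- the value of the element at index j after n doubling rounds
def pvW (shorter longer : Int) (n : Nat) (j : Nat) : Int :=
  ((n : Int) - (pyBinOnes j : Int)) * shorter + (pyBinOnes j : Int) * longer

lemma pyBinOnes_two_mul (j : Nat) : pyBinOnes (2 * j) = pyBinOnes j := by
  rcases Nat.eq_zero_or_pos j with h | h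
  · simp [h, pyBinOnes]
  · rw [pyBinOnes]
    have : ¬ (2 * j = 0) := by omega
    simp [this, Nat.mul_div_cancel_left j (by norm_num : 0 < 2), Nat.mul_mod_right]

lemma pyBinOnes_two_mul_add_one (j : Nat) : pyBinOnes (2 * j + 1) = pyBinOnes j + 1 := by
  rw [pyBinOnes]
  have h1 : (2 * j + 1) / 2 = j := by omega
  have h2 : (2 * j + 1) % 2 = 1 := by omega
  simp [h1, h2]

lemma pvW_even (s l : Int) (n j : Nat) : pvW s l (n + 1) (2 * j) = s + pvW s l n j := by
  simp [pvW, pyBinOnes_two_mul]; ring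

lemma pvW_odd (s l : Int) (n j : Nat) : pvW s l (n + 1) (2 * j + 1) = l + pvW s l n j := by
  simp [pvW, pyBinOnes_two_mul_add_one]; push_cast; ring

lemma pvRangeTwoMul (m : Nat) :
    List.range (2 * m) = (List.range m).flatMap (fun j => [2 * j, 2 * j + 1]) := by
  induction m with
  | zero => simp
  | succ m ih =>
    have : 2 * (m + 1) = (2 * m) + 1 + 1 := by omega
    rw [this, List.range_succ, List.range_succ, List.range_succ, ih]
    simp

lemma loop_char (s l : Int) (n : Nat) : ∀ (L : List Int),
    divingBoard1Loop s l (n : Int) L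
      = (List.range (2 ^ n)).flatMap (fun j => L.map (· + pvW s l n j)) := by
  induction n with
  | zero =>
    intro L
    rw [divingBoard1Loop, dif_neg (by norm_num)]
    have h1 : (2:Nat)^0 = 1 := rfl
    rw [h1, List.range_one, List.flatMap_cons, List.flatMap_nil, List.append_nil]
    have h2 : pvW s l 0 0 = 0 := by simp [pvW, pyBinOnes]
    rw [h2]
    simp
  | succ n ih =>
    intro L
    rw [divingBoard1Loop]
    have hpos : (0 : Int) < ((n : Nat) + 1 : Nat) := by omega
    rw [dif_pos hpos]
    have hk : ((n + 1 : Nat) : Int) - 1 = (n : Int) := by omega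
    rw [hk, ih]
    have hpow : 2 ^ (n + 1) = 2 * 2 ^ n := by ring
    rw [hpow, pvRangeTwoMul, List.flatMap_assoc]
    apply List.flatMap_congr
    intro j hj
    simp only [List.flatMap_cons, List.flatMap_nil, List.append_nil, List.map_append,
      List.map_map, pvW_even, pvW_odd]
    congr 1 <;> (apply List.map_congr_left; intro x hx; simp [Function.comp]; ring)

theorem divingBoard1_spec : Claim_equal_divingBoard1 := by
  intro s l k _ hk
  unfold Spec_divingBoard1 divingBoard1 divingBoard1_alt
  by_cases h0 : k = 0
  · simp [h0]
  · have hke : (k.toNat : Int) = k := by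
      unfold Pre_divingBoard1 at hk; omega
    simp only [beq_iff_eq, if_neg h0]
    rw [← hke, loop_char]
    simp only [List.map_cons, List.map_nil]
    rw [pvFlatMapSingleton, Int.toNat_natCast]
    apply List.map_congr_left
    intro j hj
    simp only [pvW]
    rw [hke]
    ring
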